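-- pv_equiv track=rewrite | github.com/terminaldweller/colo | colo/colo.py | color_default
-- ===== SOURCE A (Python) =====
-- BASH_STR = "\x1b[38;5;XXXmcolourXXX YYY \x1b[0m\t"
--
-- def color_default(number_colo_list) -> str:
--     """print numbers only"""
--     print_list = str()
--     for i, number_colo in enumerate(number_colo_list):
--         if i % 12 == 0 and i != 0:
--             print_list += "\n"
--         print_list += BASH_STR.replace("XXX", number_colo).replace(
--             "YYY", number_colo
--         )
--     return print_list
-- ===== SOURCE B (Python) =====
-- BASH_STR = "\x1b[38;5;XXXmcolourXXX YYY \x1b[0m\t"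
--
-- def color_default(number_colo_list) -> str:
--     """print numbers only"""
--     cells = [BASH_STR.replace("XXX", x).replace("YYY", x) for x in number_colo_list]
--     rows = ["".join(cells[i : i + 12]) for i in range(0, len(cells), 12)]
--     return "\n".join(rows)
-- ===== Notes on version B (the rewrite author's own statement) =====
-- stated objective: alternative
-- what changed: Replaces the single accumulating loop with modular-index newline insertion by a three-stage pipeline: format all cells with a comprehension, slice the cell list into chunks of 12, and join chunks with '' and rows with '\n'.
import Mathlib
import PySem

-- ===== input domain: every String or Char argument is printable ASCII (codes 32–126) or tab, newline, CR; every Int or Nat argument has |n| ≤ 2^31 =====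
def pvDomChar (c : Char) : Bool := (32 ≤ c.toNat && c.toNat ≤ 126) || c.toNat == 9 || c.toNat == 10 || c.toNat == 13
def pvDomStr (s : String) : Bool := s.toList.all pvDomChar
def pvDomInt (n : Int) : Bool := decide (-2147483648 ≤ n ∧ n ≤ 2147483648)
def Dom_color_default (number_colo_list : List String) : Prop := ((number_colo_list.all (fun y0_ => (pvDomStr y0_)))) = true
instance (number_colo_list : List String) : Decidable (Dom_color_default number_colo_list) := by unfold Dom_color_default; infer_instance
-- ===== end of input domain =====

-- B builds the rows by slicing the formatted-cell list into chunks of 12 and joining, instead of A's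
-- accumulating loop that inserts '\n' at every index divisible by 12; same value, alternative decomposition.

-- ===== PORT A =====
def pvBashStr : String := "\x1b[38;5;XXXmcolourXXX YYY \x1b[0m\t"

-- BASH_STR.replace("XXX", x).replace("YYY", x), on the List Char side (exact)
def pvCell (x : String) : List Char :=
  PySem.Chars.replace (PySem.Chars.replace pvBashStr.toList "XXX".toList x.toList) "YYY".toList x.toList

def color_default (number_colo_list : List String) : String :=
  String.ofList ((PySem.List.enumerate number_colo_list).foldl
    (fun acc p => (if p.1 % 12 = 0 ∧ p.1 ≠ 0 then acc ++ ['\n'] else acc) ++ pvCell p.2) [])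

-- ===== PORT B =====
def color_default_alt (number_colo_list : List String) : String :=
  let cells := number_colo_list.map pvCell
  let rows := (PySem.List.pyRange 0 (cells.length : Int) 12).map
    (fun i => PySem.Chars.join [] (PySem.List.slice cells (some i) (some (i + 12))))
  String.ofList (PySem.Chars.join ['\n'] rows)

-- ===== PRECONDITION & SPEC =====
def Spec_color_default (number_colo_list : List String) (out : String) : Prop := out = color_default_alt number_colo_list
instance (number_colo_list : List String) (out : String) : Decidable (Spec_color_default number_colo_list out) := by unfold Spec_color_default; infer_instance

-- ===== CLAIM (what is proved, stated in full; the proofs are below) =====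
def Claim_equal_color_default : Prop := ∀ (number_colo_list : List String), Dom_color_default number_colo_list → Spec_color_default number_colo_list (color_default number_colo_list)

-- ===== LEMMAS AND PROOFS =====

-- the piece A appends for index i before the cell
def pvNl (i : Int) : List Char := if i % 12 = 0 ∧ i ≠ 0 then ['\n'] else []

def pvH (p : Int × List Char) : List Char := pvNl p.1 ++ p.2

def pvRows (cells : List (List Char)) : List (List Char) :=
  (PySem.List.pyRange 0 (cells.length : Int) 12).map
    (fun i => PySem.Chars.join [] (PySem.List.slice cells (some i) (some (i + 12))))

theorem pvFoldl (ps : List (Int × String)) (acc : List Char) :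
    ps.foldl (fun acc p => (if p.1 % 12 = 0 ∧ p.1 ≠ 0 then acc ++ ['\n'] else acc) ++ pvCell p.2) acc
      = acc ++ ps.flatMap (fun p => pvNl p.1 ++ pvCell p.2) := by
  induction ps generalizing acc with
  | nil => simp
  | cons p ps ih =>
    simp only [List.foldl_cons, List.flatMap_cons, ih, pvNl]
    split_ifs <;> simp

theorem pvEnumMap {α β : Type} (f : α → β) (xs : List α) (s : Int) :
    PySem.List.enumerate (xs.map f) s = (PySem.List.enumerate xs s).map (fun p => (p.1, f p.2)) := by
  induction xs generalizing s with
  | nil => simp [PySem.List.enumerate_nil]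
  | cons x xs ih => simp [PySem.List.enumerate_cons, ih]

theorem pvJoinNil (ps : List (List Char)) : PySem.Chars.join [] ps = ps.flatten := by
  induction ps with
  | nil => simp [PySem.Chars.join_nil]
  | cons p ps ih =>
    cases ps with
    | nil => simp [PySem.Chars.join_singleton]
    | cons q r => simp [PySem.Chars.join_cons_cons, ih]

-- the flatMap of pvH depends only on the offset's residue, once every index is nonzero
theorem pvMod (xs : List (List Char)) (s t : Int) (hs : 1 ≤ s) (ht : 1 ≤ t) (h : s % 12 = t % 12) :
    (PySem.List.enumerate xs s).flatMap pvH = (PySem.List.enumerate xs t).flatMap pvH := by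
  induction xs generalizing s t with
  | nil => simp [PySem.List.enumerate_nil]
  | cons x xs ih =>
    simp only [PySem.List.enumerate_cons, List.flatMap_cons]
    rw [ih (s+1) (t+1) (by omega) (by omega) (by omega)]
    have : pvNl s = pvNl t := by
      unfold pvNl
      split_ifs with h1 h2 h2 <;> first | rfl | omega
    simp [pvH, this]

-- a chunk entirely inside [0, 12) produces no newline
theorem pvChunkFlat (xs : List (List Char)) (s : Int) (h0 : 0 ≤ s) (h : s + xs.length ≤ 12) :
    (PySem.List.enumerate xs s).flatMap pvH = xs.flatten := by
  induction xs generalizing s with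
  | nil => simp [PySem.List.enumerate_nil]
  | cons x xs ih =>
    simp only [PySem.List.enumerate_cons, List.flatMap_cons, List.flatten_cons]
    rw [ih (s+1) (by omega) (by simp at h ⊢; omega)]
    have : pvNl s = [] := by
      unfold pvNl
      have hlt : s < 12 := by simp at h; omega
      split_ifs with h1
      · exfalso; omega
      · rfl
    simp [pvH, this]

-- offset a nonzero multiple of 12: exactly one leading newline, then as from offset 0
theorem pvShift (xs : List (List Char)) (hxs : xs ≠ []) (s : Int) (h12 : s % 12 = 0) (hs : 12 ≤ s) :
    (PySem.List.enumerate xs s).flatMap pvH = '\n' :: (PySem.List.enumerate xs 0).flatMap pvH := by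
  cases xs with
  | nil => exact absurd rfl hxs
  | cons x xs =>
    simp only [PySem.List.enumerate_cons, List.flatMap_cons]
    rw [pvMod xs (s+1) 1 (by omega) (by omega) (by omega)]
    have h1 : pvNl s = ['\n'] := by unfold pvNl; split_ifs with h <;> first | rfl | omega
    have h2 : pvNl 0 = [] := by unfold pvNl; split_ifs with h <;> first | rfl | omega
    simp [pvH, h1, h2]

theorem pvRangeCons (n : Int) (h : 0 < n) :
    PySem.List.pyRange 0 n 12 = 0 :: PySem.List.pyRange 12 n 12 := by
  rw [PySem.List.pyRange_of_pos 0 n (by norm_num), PySem.List.pyRange_of_pos 12 n (by norm_num)]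
  by_cases h12 : 12 < n
  · have e1 : ((n - 0 + 12 - 1) / 12 : Int) = (n - 12 + 12 - 1) / 12 + 1 := by omega
    simp only [if_pos h, if_pos h12, e1]
    have e2 : ((n - 12 + 12 - 1) / 12 + 1 : Int).toNat = ((n - 12 + 12 - 1) / 12 : Int).toNat + 1 := by
      have : (0:Int) ≤ (n - 12 + 12 - 1) / 12 := by omega
      omega
    rw [e2, List.range_succ_eq_map]
    simp only [List.map_cons, List.map_map]
    refine congrArg₂ _ (by norm_num) (List.map_congr_left fun k _ => ?_)
    simp only [Function.comp]
    push_cast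
    ring
  · rw [if_pos h, if_neg h12]
    have e1 : ((n - 0 + 12 - 1) / 12 : Int).toNat = 1 := by omega
    rw [e1]
    simp [List.range_succ]

theorem pvRangeShift (n : Int) :
    PySem.List.pyRange 12 n 12 = (PySem.List.pyRange 0 (n - 12) 12).map (· + 12) := by
  rw [PySem.List.pyRange_of_pos 12 n (by norm_num), PySem.List.pyRange_of_pos 0 (n-12) (by norm_num)]
  by_cases h12 : 12 < n
  · rw [if_pos h12, if_pos (show (0:Int) < n - 12 by omega), List.map_map]
    have e : (n - 12 - 0 + 12 - 1 : Int) = n - 12 + 12 - 1 := by ring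
    rw [e]
    refine List.map_congr_left fun k _ => ?_
    simp only [Function.comp]
    ring
  · rw [if_neg h12, if_neg (show ¬ (0:Int) < n - 12 by omega)]
    simp

theorem pvRowsCons (c rest : List (List Char)) (hc : c.length = 12) :
    pvRows (c ++ rest) = PySem.Chars.join [] c :: pvRows rest := by
  unfold pvRows
  have hlen : ((c ++ rest).length : Int) = (rest.length : Int) + 12 := by
    simp [hc]; omega
  rw [hlen, pvRangeCons _ (by omega), pvRangeShift,
      show ((rest.length : Int) + 12 - 12) = (rest.length : Int) by ring,
      List.map_cons, List.map_map]
  refine congrArg₂ _ ?_ (List.map_congr_left fun i hi => ?_)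
  · -- head row: slice cells [0 : 12] = c
    rw [show ((0:Int) + 12) = 12 by norm_num, PySem.List.slice_zero_start,
        PySem.List.slice_to _ (by norm_num),
        show ((12:Int).toNat) = 12 from rfl, List.take_append_of_le_length (by omega),
        List.take_of_length_le (by omega)]
  · -- shifted rows: slice cells [i+12 : i+24] = slice rest [i : i+12]
    have hmem := (PySem.List.mem_pyRange_iff_of_pos (by norm_num : (0:Int) < 12) i).mp hi
    obtain ⟨h0, _, _⟩ := hmem
    obtain ⟨j, rfl⟩ : ∃ j : Nat, i = (j : Int) := ⟨i.toNat, by omega⟩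
    simp only [Function.comp]
    congr 1
    rw [show ((j:Int) + 12) = ((j + 12 : Nat) : Int) by push_cast; ring,
        show ((j + 12 : Nat) : Int) + 12 = ((j + 12 : Nat) : Int) + ((12:Nat) : Int) by norm_num,
        PySem.List.slice_natCast_add,
        show ((j + 12 : Nat) : Int) = ((j : Nat) : Int) + ((12:Nat):Int) by push_cast; ring,
        PySem.List.slice_natCast_add]
    congr 1
    rw [List.drop_append]
    simp [hc, List.drop_eq_nil_of_le]

theorem pvRangeNil (n : Int) (h : n ≤ 0) : PySem.List.pyRange 0 n 12 = [] := by
  rw [PySem.List.pyRange_of_pos 0 n (by norm_num), if_neg (by omega)]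
  simp

theorem pvRangeNil12 (n : Int) (h : n ≤ 12) : PySem.List.pyRange 12 n 12 = [] := by
  rw [PySem.List.pyRange_of_pos 12 n (by norm_num), if_neg (by omega)]
  simp

theorem pvMain (N : Nat) : ∀ (cells : List (List Char)), cells.length ≤ N →
    (PySem.List.enumerate cells 0).flatMap pvH = PySem.Chars.join ['\n'] (pvRows cells) := by
  induction N with
  | zero =>
    intro cells hlen
    have : cells = [] := List.length_eq_zero_iff.mp (by omega)
    subst this
    simp [pvRows, PySem.List.enumerate_nil, pvRangeNil, PySem.Chars.join_nil]
  | succ N ih =>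
    intro cells hlen
    by_cases hnil : cells = []
    · subst hnil
      simp [pvRows, PySem.List.enumerate_nil, pvRangeNil, PySem.Chars.join_nil]
    · have hpos : 0 < cells.length := List.length_pos_iff.mpr hnil
      by_cases hsmall : cells.length ≤ 12
      · -- a single row
        rw [pvChunkFlat cells 0 le_rfl (by omega)]
        unfold pvRows
        rw [pvRangeCons _ (by exact_mod_cast hpos), pvRangeNil12 _ (by exact_mod_cast hsmall),
            List.map_cons, List.map_nil, PySem.Chars.join_singleton,
            show ((0:Int) + 12) = 12 by norm_num, PySem.List.slice_zero_start,
            PySem.List.slice_to _ (by norm_num), pvJoinNil]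
        congr 1
        exact (List.take_of_length_le (by omega)).symm
      · -- first chunk of 12, then recurse on the rest
        have hsplit := (List.take_append_drop 12 cells).symm
        have hc12 : (cells.take 12).length = 12 := by
          rw [List.length_take]; omega
        have hrest : cells.drop 12 ≠ [] := by
          intro hempty
          have := List.length_drop (l := cells) (i := 12)
          rw [hempty] at this
          simp at this
          omega
        conv_lhs => rw [hsplit]
        rw [PySem.List.enumerate_append, List.flatMap_append,
            pvChunkFlat _ 0 le_rfl (by omega),
            pvShift _ hrest _ (by rw [hc12]; decide) (by rw [hc12]; norm_num)]
        conv_rhs => rw [hsplit]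
        rw [pvRowsCons _ _ hc12]
        have hrows : ∃ r0 rtl, pvRows (cells.drop 12) = r0 :: rtl := by
          unfold pvRows
          rw [pvRangeCons _ (by
            have : 0 < (cells.drop 12).length := List.length_pos_iff.mpr hrest
            exact_mod_cast this), List.map_cons]
          exact ⟨_, _, rfl⟩
        obtain ⟨r0, rtl, hr⟩ := hrows
        rw [hr, PySem.Chars.join_cons_cons, ← hr,
            ← ih (cells.drop 12) (by rw [List.length_drop]; omega)]
        simp [pvJoinNil]

theorem pvFlatMapEq (l : List String) :
    (PySem.List.enumerate l 0).flatMap (fun p => pvNl p.1 ++ pvCell p.2)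
      = (PySem.List.enumerate (l.map pvCell) 0).flatMap pvH := by
  rw [pvEnumMap pvCell l 0, List.flatMap_map]
  rfl

-- ===== VERDICT (by name: the statement is the Claim_ definition above) =====
theorem color_default_spec : Claim_equal_color_default := by
  intro l _hdom
  unfold Spec_color_default color_default color_default_alt
  rw [pvFoldl, List.nil_append, pvFlatMapEq, pvMain (l.map pvCell).length _ le_rfl]
  rfl
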